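-- pv_equiv track=rewrite | github.com/Thiaguito2024/Ejercicios-Programacion | Paquetes/funciones_stark.py | maximo_minimo_diccionario
-- ===== SOURCE A (Python) =====
-- def maximo_minimo_diccionario(lista:list, clave:str, accion:str)->dict:
--     """
--     Obtiene maximo o minimo segun lo requiera el usuario y lo devuelve
--     """
--     min_max = lista[0]
--     for i in range(1, len(lista)):
--         if accion == "Maximo" and int(lista[i][clave]) > int(min_max[clave]):
--             min_max = lista[i]
--         if accion == "Minimo" and int(lista[i][clave]) < int(min_max[clave]):
--             min_max = lista[i]
--
--     return min_max
-- ===== SOURCE B (Python) =====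
-- def maximo_minimo_diccionario(lista: list, clave: str, accion: str) -> dict:
--     """Sort-then-take-first strategy; stable sort (reverse=True for Maximo) keeps the first-occurrence tie-breaking of the scan."""
--     if accion == "Maximo":
--         return sorted(lista, key=lambda d: int(d[clave]), reverse=True)[0]
--     if accion == "Minimo":
--         return sorted(lista, key=lambda d: int(d[clave]))[0]
--     return lista[0]
-- ===== Notes on version B (the rewrite author's own statement) =====
-- stated objective: alternative
-- what changed: Replaces the index loop that keeps a running extreme with a stable sort by int key (reverse=True for Maximo) followed by taking the first element.
-- outside the precondition, e.g. on maximo_minimo_diccionario([{'k': 'x'}], 'k', 'Maximo'): A returns {'k': 'x'}, B raises ValueError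
import Mathlib
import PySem

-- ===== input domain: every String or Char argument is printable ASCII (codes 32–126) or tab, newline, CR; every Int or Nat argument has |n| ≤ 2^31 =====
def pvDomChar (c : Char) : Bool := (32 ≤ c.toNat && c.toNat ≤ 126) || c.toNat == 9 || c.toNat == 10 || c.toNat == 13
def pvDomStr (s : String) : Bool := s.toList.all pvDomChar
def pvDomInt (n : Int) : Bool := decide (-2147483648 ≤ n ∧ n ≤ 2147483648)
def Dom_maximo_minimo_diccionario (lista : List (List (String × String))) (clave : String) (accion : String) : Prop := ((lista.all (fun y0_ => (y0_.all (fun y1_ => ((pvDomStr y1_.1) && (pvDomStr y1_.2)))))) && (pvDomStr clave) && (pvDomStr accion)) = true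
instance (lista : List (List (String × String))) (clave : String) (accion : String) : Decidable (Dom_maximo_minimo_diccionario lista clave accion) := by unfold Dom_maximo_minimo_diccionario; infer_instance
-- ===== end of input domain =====

-- B replaces A's running-extreme index loop by a stable sort on the int key plus taking the first element (objective: alternative).

-- ===== PORT A =====
-- int(d[clave]) as A evaluates it; defaults are never reached on Pre_ inputs
def pvKeyA (d : List (String × String)) (clave : String) : Int :=
  (PySem.Int.ofStr? ((PySem.Dict.get? (PySem.Dict.mk d) clave).getD "")).getD 0

def maximo_minimo_diccionario (lista : List (List (String × String))) (clave : String) (accion : String) : List (String × String) :=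
  List.foldl
    (fun mm i =>
      (fun mm li =>
        let mm1 := if accion = "Maximo" ∧ pvKeyA li clave > pvKeyA mm clave then li else mm
        if accion = "Minimo" ∧ pvKeyA li clave < pvKeyA mm1 clave then li else mm1)
        mm (PySem.List.pyGetD lista i []))
    (PySem.List.pyGetD lista 0 [])
    (PySem.List.pyRange 1 (PySem.List.len lista))

-- ===== PORT B =====
def pvKeyB (d : List (String × String)) (clave : String) : Int :=
  (PySem.Int.ofStr? ((PySem.Dict.get? (PySem.Dict.mk d) clave).getD "")).getD 0

def maximo_minimo_diccionario_alt (lista : List (List (String × String))) (clave : String) (accion : String) : List (String × String) :=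
  if accion = "Maximo" then (PySem.List.sorted lista (fun d => pvKeyB d clave) true).headD []
  else if accion = "Minimo" then (PySem.List.sorted lista (fun d => pvKeyB d clave)).headD []
  else lista.headD []

-- ===== PRECONDITION & SPEC =====
-- Pre_ excludes the empty list (A raises IndexError) and, when accion is "Maximo"/"Minimo", lists
-- containing a dict whose value under clave is missing or not int-parseable: A raises there whenever the
-- list has 2+ elements, and on a bad single-element list (where A returns it unparsed) B's sort evaluates
-- the key and raises ValueError/KeyError, so B itself raises on every excluded non-empty input.
def Pre_maximo_minimo_diccionario (lista : List (List (String × String))) (clave : String) (accion : String) : Prop :=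
  lista ≠ [] ∧ ((accion = "Maximo" ∨ accion = "Minimo") →
    ∀ d ∈ lista, ((PySem.Dict.get? (PySem.Dict.mk d) clave).getD "" |> PySem.Int.ofStr?).isSome)
instance (lista : List (List (String × String))) (clave : String) (accion : String) : Decidable (Pre_maximo_minimo_diccionario lista clave accion) := by unfold Pre_maximo_minimo_diccionario; infer_instance

def pvWitness_maximo_minimo_diccionario : (List (List (String × String))) × String × String :=
  ([[("k", "3")], [("k", "7")]], "k", "Maximo")

def Spec_maximo_minimo_diccionario (lista : List (List (String × String))) (clave : String) (accion : String) (out : List (String × String)) : Prop := out = maximo_minimo_diccionario_alt lista clave accion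
instance (lista : List (List (String × String))) (clave : String) (accion : String) (out : List (String × String)) : Decidable (Spec_maximo_minimo_diccionario lista clave accion out) := by unfold Spec_maximo_minimo_diccionario; infer_instance

-- ===== CLAIM (what is proved, stated in full; the proofs are below) =====
def Claim_equal_maximo_minimo_diccionario : Prop := ∀ (lista : List (List (String × String))) (clave : String) (accion : String), Dom_maximo_minimo_diccionario lista clave accion → Pre_maximo_minimo_diccionario lista clave accion → Spec_maximo_minimo_diccionario lista clave accion (maximo_minimo_diccionario lista clave accion)

-- ===== LEMMAS AND PROOFS =====

-- head of left-to-right insertion (descending) = running strict-max loop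
theorem pv_head_ins_rev {α : Type} (key : α → Int) :
    ∀ (xs : List α) (a : α) (t : List α),
      (List.foldl (fun acc x => PySem.List.insertBy (fun p q => decide (key q < key p)) x acc) (a :: t) xs).head?
        = some (List.foldl (fun b x => if key b < key x then x else b) a xs) := by
  intro xs
  induction xs with
  | nil => intro a t; rfl
  | cons x rest ih =>
    intro a t
    simp only [List.foldl, PySem.List.insertBy]
    by_cases h : key a < key x
    · simp [h, ih]
    · simp [h, ih]

-- head of left-to-right insertion (ascending) = running strict-min loop
theorem pv_head_ins {α : Type} (key : α → Int) :
    ∀ (xs : List α) (a : α) (t : List α),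
      (List.foldl (fun acc x => PySem.List.insertBy (fun p q => decide (key p < key q)) x acc) (a :: t) xs).head?
        = some (List.foldl (fun b x => if key x < key b then x else b) a xs) := by
  intro xs
  induction xs with
  | nil => intro a t; rfl
  | cons x rest ih =>
    intro a t
    simp only [List.foldl, PySem.List.insertBy]
    by_cases h : key x < key a
    · simp [h, ih]
    · simp [h, ih]

-- ===== VERDICT (by name: the statement is the Claim_ definition above) =====
theorem maximo_minimo_diccionario_spec : Claim_equal_maximo_minimo_diccionario := by
  intro lista clave accion _ hpre
  unfold Spec_maximo_minimo_diccionario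
  obtain ⟨hne, -⟩ := hpre
  obtain ⟨a, t, rfl⟩ : ∃ a t, lista = a :: t := by
    cases lista with
    | nil => exact absurd rfl hne
    | cons a t => exact ⟨a, t, rfl⟩
  unfold maximo_minimo_diccionario maximo_minimo_diccionario_alt
  rw [PySem.List.foldl_pyRange_pyGetD (a := 1) (a :: t) []
        (fun mm li =>
          let mm1 := if accion = "Maximo" ∧ pvKeyA li clave > pvKeyA mm clave then li else mm
          if accion = "Minimo" ∧ pvKeyA li clave < pvKeyA mm1 clave then li else mm1)
        _ (by norm_num)]
  by_cases hmax : accion = "Maximo"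
  · subst hmax
    rw [if_pos rfl, PySem.List.sorted_rev_eq_foldl_insertBy, List.headD_eq_head?_getD]
    simp only [List.foldl, PySem.List.insertBy]
    rw [pv_head_ins_rev (fun d => pvKeyB d clave) t a []]
    simp [pvKeyA, pvKeyB, PySem.List.pyGetD]
    rfl
  · by_cases hmin : accion = "Minimo"
    · subst hmin
      rw [if_neg (by decide), if_pos rfl, PySem.List.sorted_eq_foldl_insertBy, List.headD_eq_head?_getD]
      simp only [List.foldl, PySem.List.insertBy]
      rw [pv_head_ins (fun d => pvKeyB d clave) t a []]
      simp [pvKeyA, pvKeyB, PySem.List.pyGetD]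
      rfl
    · rw [if_neg hmax, if_neg hmin]
      simp [hmax, hmin, PySem.List.pyGetD]
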